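-- pv_equiv track=rewrite | github.com/Shadowedvaca/PullAllTheThings-site | src/sv_common/guild_sync/quality_track.py | track_from_bonus_ids
-- ===== SOURCE A (Python) =====
-- from typing import Optional
--
-- _DEFAULT_SIMC_BONUS_IDS: dict[str, list[int]] = {
--     "V": [1498, 1499],
--     "C": [1516, 1517, 1518, 12790, 12795],           # TWW S2 + Midnight base/normal
--     "H": [1520, 1521, 1522, 12798, 12801, 13621],    # TWW S2 + Midnight heroic/M+ + Midnight crafted H
--     "M": [1524, 1525, 1526, 13622],                  # TWW S2 + Midnight crafted M
-- }
--
-- def track_from_bonus_ids(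
--     bonus_ids: list[int],
--     custom_map: Optional[dict[str, list[int]]] = None,
-- ) -> Optional[str]:
--     """Derive V/C/H/M from a list of SimC bonus IDs.
--
--     Uses the built-in TWW S2 mapping by default.  Pass a custom_map from
--     site_config.simc_track_bonus_ids to override for a new season.
--     """
--     mapping = custom_map if custom_map is not None else _DEFAULT_SIMC_BONUS_IDS
--     bonus_set = set(bonus_ids)
--     for track, ids in mapping.items():
--         if bonus_set & set(ids):
--             return track
--     return None
-- ===== SOURCE B (Python) =====
-- from typing import Optional
--
-- _DEFAULT_SIMC_BONUS_IDS: dict[str, list[int]] = {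
--     "V": [1498, 1499],
--     "C": [1516, 1517, 1518, 12790, 12795],
--     "H": [1520, 1521, 1522, 12798, 12801, 13621],
--     "M": [1524, 1525, 1526, 13622],
-- }
--
-- def track_from_bonus_ids(
--     bonus_ids: list[int],
--     custom_map: Optional[dict[str, list[int]]] = None,
-- ) -> Optional[str]:
--     """Derive V/C/H/M from SimC bonus IDs via an inverted id->track index."""
--     mapping = custom_map if custom_map is not None else _DEFAULT_SIMC_BONUS_IDS
--     idx: dict[int, tuple[int, str]] = {}
--     for pos, (track, ids) in enumerate(mapping.items()):
--         for i in ids: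
--             if i not in idx:
--                 idx[i] = (pos, track)
--     best: Optional[tuple[int, str]] = None
--     for i in bonus_ids:
--         hit = idx.get(i)
--         if hit is not None and (best is None or hit[0] < best[0]):
--             best = hit
--     return None if best is None else best[1]
-- ===== Notes on version B (the rewrite author's own statement) =====
-- stated objective: alternative
-- what changed: Replaces the per-track set-intersection scan with a precomputed inverted index from bonus id to (track position, track), then a single pass over bonus_ids keeping the hit with the smallest mapping position.
import Mathlib
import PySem

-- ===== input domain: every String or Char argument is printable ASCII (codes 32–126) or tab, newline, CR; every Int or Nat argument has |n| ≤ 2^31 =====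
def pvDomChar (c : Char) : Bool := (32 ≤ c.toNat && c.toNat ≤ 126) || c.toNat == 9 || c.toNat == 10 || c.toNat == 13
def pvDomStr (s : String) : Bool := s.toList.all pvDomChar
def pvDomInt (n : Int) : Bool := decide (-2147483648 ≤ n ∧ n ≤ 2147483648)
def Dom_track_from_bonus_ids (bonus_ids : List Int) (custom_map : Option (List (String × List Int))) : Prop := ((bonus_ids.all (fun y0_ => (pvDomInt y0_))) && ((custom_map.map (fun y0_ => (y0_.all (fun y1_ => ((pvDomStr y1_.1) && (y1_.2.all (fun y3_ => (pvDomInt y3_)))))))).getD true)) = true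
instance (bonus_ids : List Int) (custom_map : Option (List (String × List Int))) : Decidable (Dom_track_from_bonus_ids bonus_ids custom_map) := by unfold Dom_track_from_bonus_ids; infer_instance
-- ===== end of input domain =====

-- B builds an inverted id→(position, track) index once and takes the minimum-position
-- hit over bonus_ids, instead of A's per-track set intersection; objective: alternative.

def pvDefaultMap : List (String × List Int) :=
  [("V", [1498, 1499]),
   ("C", [1516, 1517, 1518, 12790, 12795]),
   ("H", [1520, 1521, 1522, 12798, 12801, 13621]),
   ("M", [1524, 1525, 1526, 13622])]

-- ===== PORT A =====
-- for track, ids in mapping.items(): if bonus_set & set(ids): return track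
def pvALoop (bs : PySem.Set Int) : List (String × List Int) → Option String
  | [] => none
  | (track, ids) :: rest =>
      if PySem.Set.inter bs (PySem.Set.ofList ids) ≠ [] then some track
      else pvALoop bs rest

def track_from_bonus_ids (bonus_ids : List Int) (custom_map : Option (List (String × List Int))) : Option String :=
  let mapping := (PySem.Dict.ofList (custom_map.getD pvDefaultMap)).items
  pvALoop (PySem.Set.ofList bonus_ids) mapping

-- ===== PORT B =====
-- if i not in idx: idx[i] = (pos, track)   (idx as an assoc list; first write wins)
def pvIdxInsert (idx : List (Int × Int × String)) (i : Int) (pos : Int) (track : String) : List (Int × Int × String) :=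
  if (idx.find? (fun e => e.1 == i)).isSome then idx else idx ++ [(i, (pos, track))]

-- for pos, (track, ids) in enumerate(mapping.items()): for i in ids: …
def pvBuildIdx (items : List (String × List Int)) : List (Int × Int × String) :=
  (PySem.List.enumerate items 0).foldl
    (fun idx pe => pe.2.2.foldl (fun idx i => pvIdxInsert idx i pe.1 pe.2.1) idx) []

-- for i in bonus_ids: hit = idx.get(i); if hit is not None and (best is None or hit[0] < best[0]): best = hit
def pvBestLoop (idx : List (Int × Int × String)) : List Int → Option (Int × String) → Option (Int × String)
  | [], best => best
  | i :: rest, best =>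
      match (idx.find? (fun e => e.1 == i)).map (·.2) with
      | none => pvBestLoop idx rest best
      | some h =>
          match best with
          | none => pvBestLoop idx rest (some h)
          | some b => pvBestLoop idx rest (if h.1 < b.1 then some h else some b)

def track_from_bonus_ids_alt (bonus_ids : List Int) (custom_map : Option (List (String × List Int))) : Option String :=
  let mapping := (PySem.Dict.ofList (custom_map.getD pvDefaultMap)).items
  let idx := pvBuildIdx mapping
  (pvBestLoop idx bonus_ids none).map (·.2)

-- ===== PRECONDITION & SPEC =====
def Spec_track_from_bonus_ids (bonus_ids : List Int) (custom_map : Option (List (String × List Int))) (out : Option String) : Prop := out = track_from_bonus_ids_alt bonus_ids custom_map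
instance (bonus_ids : List Int) (custom_map : Option (List (String × List Int))) (out : Option String) : Decidable (Spec_track_from_bonus_ids bonus_ids custom_map out) := by unfold Spec_track_from_bonus_ids; infer_instance

-- ===== CLAIM (what is proved, stated in full; the proofs are below) =====
def Claim_equal_track_from_bonus_ids : Prop := ∀ (bonus_ids : List Int) (custom_map : Option (List (String × List Int))), Dom_track_from_bonus_ids bonus_ids custom_map → Spec_track_from_bonus_ids bonus_ids custom_map (track_from_bonus_ids bonus_ids custom_map)

-- ===== LEMMAS AND PROOFS =====

-- lookup in the inverted index
def pvLook (idx : List (Int × Int × String)) (i : Int) : Option (Int × String) :=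
  (idx.find? (fun e => e.1 == i)).map (·.2)

-- specification of the index: first item (from position n on) whose ids contain i
def pvFirstHit (i : Int) (n : Int) : List (String × List Int) → Option (Int × String)
  | [] => none
  | (t, ids) :: rest => if ids.contains i then some (n, t) else pvFirstHit i (n + 1) rest

def pvShift (h : Int × String) : Int × String := (h.1 + 1, h.2)

def pvMinFold (b : Option (Int × String)) : List (Int × String) → Option (Int × String)
  | [] => b
  | h :: rest =>
      pvMinFold (match b with
        | none => some h
        | some bb => if h.1 < bb.1 then some h else some bb) rest

theorem pvLook_insert (idx : List (Int × Int × String)) (j i pos : Int) (t : String) :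
    pvLook (pvIdxInsert idx j pos t) i
      = (pvLook idx i).orElse (fun _ => if j == i then some (pos, t) else none) := by
  unfold pvIdxInsert
  by_cases hp : (idx.find? (fun e => e.1 == j)).isSome
  · rw [if_pos hp]
    by_cases hji : j = i
    · subst hji
      rcases Option.isSome_iff_exists.mp hp with ⟨e, he⟩
      simp [pvLook, he, Option.orElse]
    · simp [beq_iff_eq, hji]
  · rw [if_neg hp]
    unfold pvLook
    rw [List.find?_append]
    cases hfi : idx.find? (fun e => e.1 == i) with
    | some e => simp [Option.orElse]
    | none =>
        by_cases hji : j = i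
        · subst hji; simp [List.find?, Option.orElse]
        · have hb : (j == i) = false := by simpa using hji
          simp [List.find?, Option.orElse, hb]

theorem pvLook_inner (ids : List Int) (idx : List (Int × Int × String)) (i pos : Int) (t : String) :
    pvLook (ids.foldl (fun idx k => pvIdxInsert idx k pos t) idx) i
      = (pvLook idx i).orElse (fun _ => if ids.contains i then some (pos, t) else none) := by
  induction ids generalizing idx with
  | nil => cases h : pvLook idx i <;> simp [Option.orElse, h]
  | cons j rest ih =>
      simp only [List.foldl_cons]
      rw [ih, pvLook_insert]
      cases h : pvLook idx i with
      | some e => simp [Option.orElse]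
      | none =>
          by_cases hji : j = i
          · simp [Option.orElse, hji]
          · have hb : (j == i) = false := by simpa using hji
            have hij : ¬ i = j := fun hh => hji hh.symm
            simp [Option.orElse, hb, hij]

theorem pvLook_build_aux (items : List (String × List Int)) (i : Int) :
    ∀ (n : Int) (idx : List (Int × Int × String)),
    pvLook ((PySem.List.enumerate items n).foldl
      (fun idx pe => pe.2.2.foldl (fun idx k => pvIdxInsert idx k pe.1 pe.2.1) idx) idx) i
      = (pvLook idx i).orElse (fun _ => pvFirstHit i n items) := by
  induction items with
  | nil => intro n idx; cases h : pvLook idx i <;> simp [PySem.List.enumerate_nil, pvFirstHit, Option.orElse, h]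
  | cons p rest ih =>
      intro n idx
      rw [PySem.List.enumerate_cons, List.foldl_cons, ih, pvLook_inner]
      cases h : pvLook idx i with
      | some e => simp [Option.orElse]
      | none =>
          obtain ⟨t, ids⟩ := p
          by_cases hc : i ∈ ids
          · simp [Option.orElse, pvFirstHit, hc]
          · simp [Option.orElse, pvFirstHit, hc]

theorem pvLook_build (items : List (String × List Int)) (i : Int) :
    pvLook (pvBuildIdx items) i = pvFirstHit i 0 items := by
  have := pvLook_build_aux items i 0 []
  simpa [pvBuildIdx, pvLook, Option.orElse] using this

theorem pvBest_eq_minFold (idx : List (Int × Int × String)) (bonus : List Int) :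
    ∀ b, pvBestLoop idx bonus b = pvMinFold b (bonus.filterMap (pvLook idx)) := by
  induction bonus with
  | nil => intro b; simp [pvBestLoop, pvMinFold]
  | cons i rest ih =>
      intro b
      rw [pvBestLoop]
      cases h : pvLook idx i with
      | none => simp only [pvLook] at h; rw [h]; simp [List.filterMap_cons, pvLook, h, ih]
      | some hv =>
          simp only [pvLook] at h; rw [h]
          cases b with
          | none => simp [List.filterMap_cons, pvLook, h, ih, pvMinFold]
          | some bb => simp [List.filterMap_cons, pvLook, h, ih, pvMinFold]

theorem pvFirstHit_ge (i : Int) (items : List (String × List Int)) :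
    ∀ (n : Int) (h : Int × String), pvFirstHit i n items = some h → n ≤ h.1 := by
  induction items with
  | nil => intro n h hh; simp [pvFirstHit] at hh
  | cons p rest ih =>
      intro n h hh
      obtain ⟨t, ids⟩ := p
      by_cases hc : i ∈ ids
      · rw [pvFirstHit, if_pos (by simpa using hc)] at hh
        cases hh
        simp
      · rw [pvFirstHit, if_neg (by simpa using hc)] at hh
        have := ih (n + 1) h hh
        omega

theorem pvFirstHit_shift (i : Int) (items : List (String × List Int)) :
    ∀ n, pvFirstHit i (n + 1) items = (pvFirstHit i n items).map pvShift := by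
  induction items with
  | nil => intro n; simp [pvFirstHit]
  | cons p rest ih =>
      intro n
      obtain ⟨t, ids⟩ := p
      by_cases hc : i ∈ ids
      · simp [pvFirstHit, hc, pvShift]
      · simp [pvFirstHit, hc, ih (n + 1)]

theorem pvMinFold_shift (hits : List (Int × String)) :
    ∀ b, pvMinFold (b.map pvShift) (hits.map pvShift) = (pvMinFold b hits).map pvShift := by
  induction hits with
  | nil => intro b; simp [pvMinFold]
  | cons h rest ih =>
      intro b
      cases b with
      | none => simpa [pvMinFold] using ih (some h)
      | some bb =>
          simp only [List.map_cons, pvMinFold, Option.map_some]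
          by_cases hlt : h.1 < bb.1
          · have hlt' : (pvShift h).1 < (pvShift bb).1 := by simp only [pvShift]; omega
            rw [if_pos hlt, if_pos hlt']
            simpa using ih (some h)
          · have hlt' : ¬ ((pvShift h).1 < (pvShift bb).1) := by simp only [pvShift]; omega
            rw [if_neg hlt, if_neg hlt']
            simpa using ih (some bb)

theorem pvMinFold_keep (t : String) (hits : List (Int × String)) :
    (∀ h ∈ hits, h = (0, t) ∨ 0 < h.1) → pvMinFold (some (0, t)) hits = some (0, t) := by
  induction hits with
  | nil => intro _; simp [pvMinFold]
  | cons h rest ih =>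
      intro hall
      have hh := hall h (by simp)
      have hnot : ¬ (h.1 < (0 : Int)) := by rcases hh with rfl | hp <;> omega
      simp only [pvMinFold, if_neg hnot]
      exact ih (fun x hx => hall x (by simp [hx]))

theorem pvMinFold_zero (t : String) (hits : List (Int × String)) :
    ∀ b, (b = none ∨ ∃ hb, b = some hb ∧ (hb = (0, t) ∨ 0 < hb.1)) →
    (0, t) ∈ hits → (∀ h ∈ hits, h = (0, t) ∨ 0 < h.1) →
    pvMinFold b hits = some ((0 : Int), t) := by
  induction hits with
  | nil => intro b _ hm _; simp at hm
  | cons h rest ih =>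
      intro b hb hm hall
      have hh := hall h (by simp)
      simp only [pvMinFold]
      by_cases hht : h = (0, t)
      · subst hht
        rcases hb with rfl | ⟨hb', rfl, hcase⟩
        · exact pvMinFold_keep t rest (fun x hx => hall x (by simp [hx]))
        · show pvMinFold (if (((0 : Int), t) : Int × String).1 < hb'.1
              then some (((0 : Int), t) : Int × String) else some hb') rest
              = some (((0 : Int), t) : Int × String)
          rcases hcase with rfl | hp
          · rw [if_neg (by exact lt_irrefl _)]
            exact pvMinFold_keep t rest (fun x hx => hall x (by simp [hx]))
          · rw [if_pos (by simpa using hp)]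
            exact pvMinFold_keep t rest (fun x hx => hall x (by simp [hx]))

      · have hp : 0 < h.1 := by rcases hh with h0 | h0; exact absurd h0 hht; exact h0
        have hm' : (0, t) ∈ rest := by
          rcases List.mem_cons.mp hm with h0 | h0
          · exact absurd h0.symm hht
          · exact h0
        apply ih _ _ hm' (fun x hx => hall x (by simp [hx]))
        rcases hb with rfl | ⟨hb', rfl, hcase⟩
        · exact Or.inr ⟨h, rfl, Or.inr hp⟩
        · by_cases hlt : h.1 < hb'.1
          · simp only [if_pos hlt]; exact Or.inr ⟨h, rfl, Or.inr hp⟩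
          · simp only [if_neg hlt]; exact Or.inr ⟨hb', rfl, hcase⟩

theorem pvGuard_iff (bonus ids : List Int) :
    PySem.Set.inter (PySem.Set.ofList bonus) (PySem.Set.ofList ids) ≠ [] ↔
      ∃ i ∈ bonus, i ∈ ids := by
  constructor
  · intro hne
    rcases List.exists_mem_of_ne_nil _ hne with ⟨x, hx⟩
    have hx' : x ∈ PySem.Set.ofList bonus ∧ x ∈ PySem.Set.ofList ids := by
      simpa [PySem.Set.mem_inter] using hx
    exact ⟨x, by simpa [PySem.Set.mem_ofList] using hx'.1,
      by simpa [PySem.Set.mem_ofList] using hx'.2⟩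
  · rintro ⟨i, hib, hii⟩
    apply List.ne_nil_of_mem (a := i)
    simp [PySem.Set.mem_inter, PySem.Set.mem_ofList, hib, hii]

theorem pvHits_shift (bonus ids : List Int) (t : String) (rest : List (String × List Int))
    (hno : ∀ i ∈ bonus, i ∉ ids) :
    bonus.filterMap (fun i => pvFirstHit i 0 ((t, ids) :: rest))
      = (bonus.filterMap (fun i => pvFirstHit i 0 rest)).map pvShift := by
  induction bonus with
  | nil => simp
  | cons i bs ih =>
      have hni : i ∉ ids := hno i (by simp)
      have hstep : pvFirstHit i 0 ((t, ids) :: rest) = (pvFirstHit i 0 rest).map pvShift := by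
        rw [pvFirstHit, if_neg (by simpa using hni)]
        exact pvFirstHit_shift i rest 0
      rw [List.filterMap_cons, List.filterMap_cons, hstep, ih (fun x hx => hno x (by simp [hx]))]
      cases pvFirstHit i 0 rest <;> simp

theorem pvMain (items : List (String × List Int)) (bonus : List Int) :
    pvALoop (PySem.Set.ofList bonus) items
      = (pvMinFold none (bonus.filterMap (fun i => pvFirstHit i 0 items))).map (·.2) := by
  induction items with
  | nil =>
      have : bonus.filterMap (fun i => pvFirstHit i 0 ([] : List (String × List Int))) = [] := by
        simp [pvFirstHit]
      simp [pvALoop, this, pvMinFold]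
  | cons p rest ih =>
      obtain ⟨t, ids⟩ := p
      by_cases hg : ∃ i ∈ bonus, i ∈ ids
      · rw [pvALoop, if_pos ((pvGuard_iff bonus ids).mpr hg)]
        rcases hg with ⟨i, hib, hii⟩
        have hmem : ((0 : Int), t) ∈ bonus.filterMap (fun i => pvFirstHit i 0 ((t, ids) :: rest)) := by
          apply List.mem_filterMap.mpr
          refine ⟨i, hib, ?_⟩
          rw [pvFirstHit, if_pos (by simpa using hii)]
        have hall : ∀ h ∈ bonus.filterMap (fun i => pvFirstHit i 0 ((t, ids) :: rest)),
            h = ((0 : Int), t) ∨ 0 < h.1 := by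
          intro h hh
          rcases List.mem_filterMap.mp hh with ⟨j, _, hj⟩
          by_cases hc : ids.contains j
          · left; rw [pvFirstHit, if_pos hc] at hj; exact (Option.some.inj hj).symm
          · right
            rw [pvFirstHit, if_neg hc] at hj
            have := pvFirstHit_ge j rest 1 h hj
            omega
        rw [pvMinFold_zero t _ none (Or.inl rfl) hmem hall]
        rfl
      · rw [pvALoop, if_neg (by rw [pvGuard_iff]; exact hg)]
        push Not at hg
        rw [pvHits_shift bonus ids t rest hg]
        have := pvMinFold_shift (bonus.filterMap (fun i => pvFirstHit i 0 rest)) none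
        simp only [Option.map_none] at this
        rw [this, ih]
        cases pvMinFold none (bonus.filterMap (fun i => pvFirstHit i 0 rest)) with
        | none => simp
        | some h => simp [pvShift]

-- ===== VERDICT (by name: the statement is the Claim_ definition above) =====
theorem track_from_bonus_ids_spec : Claim_equal_track_from_bonus_ids := by
  intro bonus_ids custom_map _
  unfold Spec_track_from_bonus_ids track_from_bonus_ids track_from_bonus_ids_alt
  show pvALoop (PySem.Set.ofList bonus_ids) ((PySem.Dict.ofList (custom_map.getD pvDefaultMap)).items)
      = (pvBestLoop (pvBuildIdx ((PySem.Dict.ofList (custom_map.getD pvDefaultMap)).items)) bonus_ids none).map (·.2)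
  rw [pvBest_eq_minFold]
  have hfun : pvLook (pvBuildIdx ((PySem.Dict.ofList (custom_map.getD pvDefaultMap)).items))
      = fun i => pvFirstHit i 0 ((PySem.Dict.ofList (custom_map.getD pvDefaultMap)).items) :=
    funext (fun i => pvLook_build _ i)
  rw [hfun]
  exact pvMain _ bonus_ids
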